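-- pv_equiv track=rewrite | github.com/Aryudesu/ABC | ABC/300_399/395/B.py | calc
-- ===== SOURCE A (Python) =====
-- def calc(N):
--     result = [[""] * N for _ in range(N)]
--     for y in range(1, N + 1):
--         i = y
--         j = N + 1 - i
--         for y in range(i, j + 1):
--             for x in range(i, j + 1):
--                 if i <= j:
--                     if i % 2 == 1:
--                         result[y - 1][x - 1] = "#"
--                     else:
--                         result[y - 1][x - 1] = "."
--     return result
-- ===== SOURCE B (Python) =====
-- def calc(N):
--     def cell(y, x):
--         r = min(x, y, N + 1 - x, N + 1 - y)
--         return "#" if r % 2 == 1 else "."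
--     return [[cell(y, x) for x in range(1, N + 1)] for y in range(1, N + 1)]
-- ===== Notes on version B (the rewrite author's own statement) =====
-- stated objective: faster
-- what changed: Instead of repainting the whole inner square for every ring (O(N^3) overwrites), B computes each cell once from the closed form ring = min(x, y, N+1-x, N+1-y) and its parity.
import Mathlib
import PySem

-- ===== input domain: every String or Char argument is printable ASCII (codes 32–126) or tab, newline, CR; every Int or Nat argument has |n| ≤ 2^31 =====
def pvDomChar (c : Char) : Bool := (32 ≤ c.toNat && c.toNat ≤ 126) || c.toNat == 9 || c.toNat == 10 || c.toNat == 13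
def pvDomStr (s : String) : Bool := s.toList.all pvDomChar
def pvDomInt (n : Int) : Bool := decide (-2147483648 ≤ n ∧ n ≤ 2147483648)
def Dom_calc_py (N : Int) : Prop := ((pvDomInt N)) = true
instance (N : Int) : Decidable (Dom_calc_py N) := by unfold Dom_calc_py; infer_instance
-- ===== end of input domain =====

-- B replaces A's repeated repainting of nested inner squares by a per-cell closed form
-- (ring = min of the four border distances, its parity gives the character), computing each cell once.

-- ===== PORT A =====
-- result[y-1][x-1] = v : the indices are nonnegative and in range whenever this line executes,
-- so List.set / List.getD with .toNat is exact here.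
def pySet2d (g : List (List String)) (y x : Int) (v : String) : List (List String) :=
  g.set y.toNat ((g.getD y.toNat []).set x.toNat v)

def calc_py (N : Int) : List (List String) :=
  let result := List.replicate N.toNat (List.replicate N.toNat "")
  (PySem.List.pyRange 1 (N + 1) 1).foldl (fun result y0 =>
    let i := y0
    let j := N + 1 - i
    (PySem.List.pyRange i (j + 1) 1).foldl (fun result y =>
      (PySem.List.pyRange i (j + 1) 1).foldl (fun result x =>
        if i ≤ j then
          if PySem.Int.mod i 2 = 1 then pySet2d result (y - 1) (x - 1) "#"
          else pySet2d result (y - 1) (x - 1) "."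
        else result) result) result) result

-- ===== PORT B =====
def cellB (N y x : Int) : String :=
  let r := min (min (min x y) (N + 1 - x)) (N + 1 - y)
  if PySem.Int.mod r 2 = 1 then "#" else "."

def calc_py_alt (N : Int) : List (List String) :=
  (PySem.List.pyRange 1 (N + 1) 1).map (fun y =>
    (PySem.List.pyRange 1 (N + 1) 1).map (fun x => cellB N y x))

-- ===== PRECONDITION & SPEC =====
def Spec_calc_py (N : Int) (out : List (List String)) : Prop := out = calc_py_alt N
instance (N : Int) (out : List (List String)) : Decidable (Spec_calc_py N out) := by unfold Spec_calc_py; infer_instance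

-- ===== CLAIM (what is proved, stated in full; the proofs are below) =====
def Claim_equal_calc_py : Prop := ∀ (N : Int), Dom_calc_py N → Spec_calc_py N (calc_py N)

-- ===== LEMMAS AND PROOFS =====

-- grid of side n whose 1-based cell (y, x) holds f y x
def gOf (n : Nat) (f : Int → Int → String) : List (List String) :=
  (List.range n).map (fun (r : Nat) => (List.range n).map (fun (c : Nat) => f (1 + (r : Int)) (1 + (c : Int))))

def ringOf (N y x : Int) : Int := min (min (min x y) (N + 1 - x)) (N + 1 - y)

def chrS (r : Int) : String := if PySem.Int.mod r 2 = 1 then "#" else "."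

-- A's outer-loop body, named for the induction (same lambda as in calc_py, lets inlined)
def outerB (N : Int) (result : List (List String)) (y0 : Int) : List (List String) :=
  (PySem.List.pyRange y0 ((N + 1 - y0) + 1) 1).foldl (fun result y =>
    (PySem.List.pyRange y0 ((N + 1 - y0) + 1) 1).foldl (fun result x =>
      if y0 ≤ N + 1 - y0 then
        if PySem.Int.mod y0 2 = 1 then pySet2d result (y - 1) (x - 1) "#"
        else pySet2d result (y - 1) (x - 1) "."
      else result) result) result

lemma gOf_length (n : Nat) (f : Int → Int → String) : (gOf n f).length = n := by
  simp only [gOf, List.length_map, List.length_range]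

lemma gOf_getElem (n : Nat) (f : Int → Int → String) (r : Nat) (h1 : r < (gOf n f).length) :
    (gOf n f)[r] = (List.range n).map (fun (c : Nat) => f (1 + (r : Int)) (1 + (c : Int))) := by
  simp only [gOf, List.getElem_map, List.getElem_range]

lemma gOf_congr (n : Nat) (f f' : Int → Int → String)
    (h : ∀ y x : Int, 1 ≤ y → y ≤ (n : Int) → 1 ≤ x → x ≤ (n : Int) → f y x = f' y x) :
    gOf n f = gOf n f' := by
  apply List.ext_getElem (by rw [gOf_length, gOf_length])
  intro r hr1 hr2
  rw [gOf_getElem, gOf_getElem]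
  rw [gOf_length] at hr1
  apply List.ext_getElem (by rw [List.length_map, List.length_map])
  intro c hc1 hc2
  simp only [List.getElem_map, List.getElem_range]
  rw [List.length_map, List.length_range] at hc1
  exact h _ _ (by omega) (by omega) (by omega) (by omega)

lemma set_map_range {α : Type} (n m : Nat) (g : Nat → α) (v : α) :
    ((List.range n).map g).set m v = (List.range n).map (fun k => if k = m then v else g k) := by
  apply List.ext_getElem (by rw [List.length_set, List.length_map, List.length_map])
  intro i h1 h2
  simp only [List.getElem_set, List.getElem_map, List.getElem_range]
  by_cases hi : i = m
  · simp [hi]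
  · simp [hi, Ne.symm hi]

lemma gOf_set (n : Nat) (f : Int → Int → String) (y x : Int) (v : String)
    (hy1 : 1 ≤ y) (hy2 : y ≤ (n : Int)) (hx1 : 1 ≤ x) (hx2 : x ≤ (n : Int)) :
    pySet2d (gOf n f) (y - 1) (x - 1) v
      = gOf n (fun y' x' => if y' = y ∧ x' = x then v else f y' x') := by
  have hyn : (y - 1).toNat < n := by omega
  have hgetD : (gOf n f).getD (y - 1).toNat []
      = (List.range n).map (fun (c : Nat) => f (1 + (((y - 1).toNat : Nat) : Int)) (1 + (c : Int))) := by
    rw [List.getD_eq_getElem _ _ (by rw [gOf_length]; exact hyn), gOf_getElem]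
  unfold pySet2d
  rw [hgetD, set_map_range]
  conv_lhs => rw [gOf]
  rw [set_map_range]
  apply List.ext_getElem (by rw [List.length_map, List.length_range, gOf_length])
  intro r hr1 hr2
  rw [List.length_map, List.length_range] at hr1
  rw [gOf_getElem]
  simp only [List.getElem_map, List.getElem_range]
  by_cases hry : r = (y - 1).toNat
  · rw [if_pos hry]
    apply List.ext_getElem (by rw [List.length_map, List.length_map])
    intro c hc1 hc2
    rw [List.length_map, List.length_range] at hc1
    simp only [List.getElem_map, List.getElem_range]
    by_cases hcx : c = (x - 1).toNat
    · rw [if_pos hcx]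
      have e1 : 1 + (c : Int) = x := by omega
      have e2 : 1 + (r : Int) = y := by omega
      simp [e1, e2]
    · rw [if_neg hcx]
      have e1 : ¬ (1 + (c : Int) = x) := by omega
      have e2 : 1 + (((y - 1).toNat : Nat) : Int) = y := by omega
      have e2' : 1 + ((y.toNat - 1 : Nat) : Int) = y := by omega
      have e3 : 1 + (r : Int) = y := by omega
      simp [e1, e2', e3]
  · rw [if_neg hry]
    apply List.ext_getElem (by rw [List.length_map, List.length_map])
    intro c hc1 hc2
    simp only [List.getElem_map, List.getElem_range]
    have e1 : ¬ (1 + (r : Int) = y) := by omega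
    simp [e1]

lemma row_fold (n : Nat) (f : Int → Int → String) (a y : Int) (m : Nat) (c : String)
    (hy1 : 1 ≤ y) (hy2 : y ≤ (n : Int)) (ha : 1 ≤ a) (ham : a + m ≤ (n : Int) + 1) :
    (PySem.List.pyRange a (a + m) 1).foldl (fun g x => pySet2d g (y - 1) (x - 1) c) (gOf n f)
      = gOf n (fun y' x' => if y' = y ∧ a ≤ x' ∧ x' < a + m then c else f y' x') := by
  induction m generalizing f with
  | zero =>
    rw [show ((0 : Nat) : Int) = 0 by rfl, add_zero, PySem.List.pyRange_one_eq_nil le_rfl]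
    apply gOf_congr
    intro y' x' _ _ _ _
    rw [if_neg (by omega)]
  | succ m ih =>
    have hsp : a + ((m + 1 : Nat) : Int) = (a + m) + 1 := by push_cast; ring
    rw [hsp, PySem.List.pyRange_one_succ_right (by omega), List.foldl_append]
    rw [ih f (by push_cast at ham ⊢; omega)]
    simp only [List.foldl_cons, List.foldl_nil]
    rw [show (a + (m : Int)) - 1 = (a + m - 1) by ring]
    have := gOf_set n (fun y' x' => if y' = y ∧ a ≤ x' ∧ x' < a + m then c else f y' x')
      y (a + m) c hy1 hy2 (by omega) (by push_cast at ham; omega)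
    rw [this]
    apply gOf_congr
    intro y' x' _ _ _ _
    dsimp only
    by_cases h1 : y' = y ∧ x' = a + m
    · rw [if_pos h1, if_pos (by omega)]
    · rw [if_neg h1]
      by_cases h2 : y' = y ∧ a ≤ x' ∧ x' < a + m
      · rw [if_pos h2, if_pos (by omega)]
      · rw [if_neg h2, if_neg (by omega)]

lemma block_fold (n : Nat) (f : Int → Int → String) (a : Int) (k m : Nat) (c : String)
    (ha : 1 ≤ a) (ham : a + m ≤ (n : Int) + 1) (hak : a + k ≤ (n : Int) + 1) :
    (PySem.List.pyRange a (a + k) 1).foldl (fun g y =>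
        (PySem.List.pyRange a (a + m) 1).foldl (fun g x => pySet2d g (y - 1) (x - 1) c) g) (gOf n f)
      = gOf n (fun y' x' => if (a ≤ y' ∧ y' < a + k) ∧ (a ≤ x' ∧ x' < a + m) then c else f y' x') := by
  induction k generalizing f with
  | zero =>
    rw [show ((0 : Nat) : Int) = 0 by rfl, add_zero, PySem.List.pyRange_one_eq_nil le_rfl]
    apply gOf_congr
    intro y' x' _ _ _ _
    rw [if_neg (by omega)]
  | succ k ih =>
    have hsp : a + ((k + 1 : Nat) : Int) = (a + k) + 1 := by push_cast; ring
    rw [hsp, PySem.List.pyRange_one_succ_right (by omega), List.foldl_append]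
    rw [ih f (by push_cast at hak ⊢; omega)]
    simp only [List.foldl_cons, List.foldl_nil]
    rw [row_fold n _ a (a + k) m c (by omega) (by push_cast at hak; omega) ha ham]
    apply gOf_congr
    intro y' x' _ _ _ _
    dsimp only
    by_cases h1 : y' = a + (k : Int) ∧ a ≤ x' ∧ x' < a + m
    · rw [if_pos h1, if_pos (by omega)]
    · rw [if_neg h1]
      by_cases h2 : (a ≤ y' ∧ y' < a + k) ∧ (a ≤ x' ∧ x' < a + m)
      · rw [if_pos h2, if_pos (by omega)]
      · rw [if_neg h2, if_neg (by omega)]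

lemma calc_py_as_fold (N : Int) :
    calc_py N = (PySem.List.pyRange 1 (N + 1) 1).foldl (outerB N) (gOf N.toNat (fun _ _ => "")) := by
  have h : gOf N.toNat (fun _ _ => "") = List.replicate N.toNat (List.replicate N.toNat "") := by
    simp only [gOf, List.map_const', List.length_range]
  rw [h]
  rfl

lemma outer_step (N : Int) (f : Int → Int → String) (i : Int) (h1 : 1 ≤ i) (hN : i ≤ N) :
    outerB N (gOf N.toNat f) i
      = gOf N.toNat (fun y x =>
          if (i ≤ y ∧ y < N + 2 - i) ∧ (i ≤ x ∧ x < N + 2 - i) then chrS i else f y x) := by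
  unfold outerB
  by_cases hij : i ≤ N + 1 - i
  · simp only [if_pos hij]
    have hn : (N.toNat : Int) = N := Int.toNat_of_nonneg (by omega)
    have hm : i + ((N + 2 - i - i).toNat : Int) = (N + 1 - i) + 1 := by omega
    by_cases hp : PySem.Int.mod i 2 = 1
    · simp only [if_pos hp]
      have hb := block_fold N.toNat f i (N + 2 - i - i).toNat (N + 2 - i - i).toNat "#"
        h1 (by omega) (by omega)
      rw [hm] at hb
      rw [hb]
      apply gOf_congr
      intro y x _ _ _ _
      rw [show chrS i = "#" by unfold chrS; rw [if_pos hp]]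
      by_cases hc : (i ≤ y ∧ y < N + 1 - i + 1) ∧ i ≤ x ∧ x < N + 1 - i + 1
      · rw [if_pos hc, if_pos (by omega)]
      · rw [if_neg hc, if_neg (by omega)]
    · simp only [if_neg hp]
      have hb := block_fold N.toNat f i (N + 2 - i - i).toNat (N + 2 - i - i).toNat "."
        h1 (by omega) (by omega)
      rw [hm] at hb
      rw [hb]
      apply gOf_congr
      intro y x _ _ _ _
      rw [show chrS i = "." by unfold chrS; rw [if_neg hp]]
      by_cases hc : (i ≤ y ∧ y < N + 1 - i + 1) ∧ i ≤ x ∧ x < N + 1 - i + 1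
      · rw [if_pos hc, if_pos (by omega)]
      · rw [if_neg hc, if_neg (by omega)]
  · rw [PySem.List.pyRange_one_eq_nil (by omega)]
    simp only [List.foldl_nil]
    apply gOf_congr
    intro y x _ _ _ _
    rw [if_neg (by omega)]

lemma outer_inv (N : Int) (k : Nat) (hk1 : 1 ≤ k) (hk : (k : Int) ≤ N) :
    (PySem.List.pyRange 1 ((k : Int) + 1) 1).foldl (outerB N) (gOf N.toNat (fun _ _ => ""))
      = gOf N.toNat (fun y x => chrS (min (ringOf N y x) k)) := by
  have hn : (N.toNat : Int) = N := Int.toNat_of_nonneg (by omega)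
  induction k with
  | zero => omega
  | succ k ih =>
    by_cases hk0 : k = 0
    · subst hk0
      rw [show (((1 : Nat) : Int) + 1) = 1 + 1 by norm_num, PySem.List.pyRange_one_succ_right (by omega),
        PySem.List.pyRange_one_eq_nil le_rfl]
      simp only [List.nil_append, List.foldl_cons, List.foldl_nil]
      rw [outer_step N _ 1 le_rfl (by omega)]
      apply gOf_congr
      intro y x hy1 hy2 hx1 hx2
      rw [hn] at hy2 hx2
      rw [if_pos (by omega)]
      congr 1
      unfold ringOf
      omega
    · have hsp : ((k + 1 : Nat) : Int) + 1 = ((k : Int) + 1) + 1 := by push_cast; ring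
      rw [hsp, PySem.List.pyRange_one_succ_right (by omega), List.foldl_append]
      rw [ih (by omega) (by omega)]
      simp only [List.foldl_cons, List.foldl_nil]
      rw [outer_step N _ ((k : Int) + 1) (by omega) (by omega)]
      apply gOf_congr
      intro y x hy1 hy2 hx1 hx2
      rw [hn] at hy2 hx2
      by_cases hc : ((k : Int) + 1 ≤ y ∧ y < N + 2 - ((k : Int) + 1)) ∧ ((k : Int) + 1 ≤ x ∧ x < N + 2 - ((k : Int) + 1))
      · rw [if_pos hc]
        have : min (ringOf N y x) ((k + 1 : Nat) : Int) = (k : Int) + 1 ∨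
            min (ringOf N y x) ((k + 1 : Nat) : Int) = ringOf N y x ∧ ringOf N y x = (k : Int) + 1 := by
          unfold ringOf; omega
        unfold chrS
        rcases this with h | h
        · rw [h]
        · rw [h.1, h.2]
      · rw [if_neg hc]
        congr 1
        unfold ringOf at *
        push_cast
        omega

lemma alt_as_gOf (N : Int) : calc_py_alt N = gOf N.toNat (fun y x => chrS (ringOf N y x)) := by
  unfold calc_py_alt gOf
  rw [PySem.List.pyRange_one]
  have : (N + 1 - 1).toNat = N.toNat := by omega
  rw [this, List.map_map]
  apply List.map_congr_left
  intro r _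
  simp only [Function.comp]
  rw [List.map_map]
  apply List.map_congr_left
  intro c _
  rfl

-- ===== VERDICT (by name: the statement is the Claim_ definition above) =====
theorem calc_py_spec : Claim_equal_calc_py := by
  intro N _
  unfold Spec_calc_py
  rw [alt_as_gOf, calc_py_as_fold]
  by_cases hN : 1 ≤ N
  · have hcast : ((N.toNat : Int)) = N := Int.toNat_of_nonneg (by omega)
    have h := outer_inv N N.toNat (by omega) (by omega)
    rw [hcast] at h
    rw [h]
    apply gOf_congr
    intro y x hy1 hy2 hx1 hx2
    have : min (ringOf N y x) N = ringOf N y x := by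
      unfold ringOf; rw [hcast] at hy2 hx2; omega
    rw [this]
  · have h1 : PySem.List.pyRange 1 (N + 1) 1 = [] := PySem.List.pyRange_one_eq_nil (by omega)
    have h2 : N.toNat = 0 := by omega
    simp [h1, h2, gOf]
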